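-- pv_equiv track=rewrite | github.com/its0din-ai/development | python/kuliahTamu/answer.py | fungsi
-- ===== SOURCE A (Python) =====
-- def fungsi(n):
--     jum = 0
--     kali = 1
--
--     while n> 0:
--         mod = n % 10
--         jum = jum + mod
--         kali = kali * mod
--         n = n // 10
--     return jum, kali
-- ===== SOURCE B (Python) =====
-- def fungsi(n):
--     if n <= 0:
--         return 0, 1
--     jum = 0
--     kali = 1
--     for c in str(n):
--         d = ord(c) - 48
--         jum += d
--         kali *= d
--     return jum, kali
-- ===== Notes on version B (the rewrite author's own statement) =====
-- stated objective: alternative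
-- what changed: B traverses the decimal string form of the number most-significant-digit first, converting each character back to a digit, instead of A's least-significant-first arithmetic mod/div loop; for non-positive input a guard reproduces the empty-loop result.
import Mathlib
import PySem

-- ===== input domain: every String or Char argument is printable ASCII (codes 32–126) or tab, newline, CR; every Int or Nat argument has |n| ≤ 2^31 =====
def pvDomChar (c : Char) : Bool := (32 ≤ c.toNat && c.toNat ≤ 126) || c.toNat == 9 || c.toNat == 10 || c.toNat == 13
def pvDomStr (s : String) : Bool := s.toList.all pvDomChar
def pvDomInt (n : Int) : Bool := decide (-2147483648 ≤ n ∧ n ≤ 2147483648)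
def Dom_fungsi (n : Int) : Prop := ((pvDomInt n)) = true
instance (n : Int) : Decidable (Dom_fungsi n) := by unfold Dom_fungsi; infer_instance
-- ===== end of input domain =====

-- B computes the digit sum/product from the decimal string of n (most-significant first)
-- instead of A's least-significant-first mod/div loop; same results, no speed claim.

-- ===== PORT A =====
-- while n > 0: mod = n % 10; jum += mod; kali *= mod; n = n // 10
def fungsiLoop (n jum kali : Int) : Int × Int :=
  if _h : 0 < n then
    fungsiLoop (PySem.Int.floordiv n 10) (jum + PySem.Int.mod n 10)
      (kali * PySem.Int.mod n 10)
  else (jum, kali)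
termination_by n.toNat
decreasing_by
  rw [PySem.Int.floordiv_eq_ediv_of_pos (by norm_num)]
  omega

def fungsi (n : Int) : Int × Int := fungsiLoop n 0 1

-- ===== PORT B =====
-- d = ord(c) - 48
def digitVal (c : Char) : Int := (c.toNat : Int) - 48

def fungsi_alt (n : Int) : Int × Int :=
  if n ≤ 0 then (0, 1)
  else (PySem.Int.toChars n).foldl
    (fun st c => (st.1 + digitVal c, st.2 * digitVal c)) (0, 1)

-- ===== PRECONDITION & SPEC =====
def Spec_fungsi (n : Int) (out : Int × Int) : Prop := out = fungsi_alt n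
instance (n : Int) (out : Int × Int) : Decidable (Spec_fungsi n out) := by unfold Spec_fungsi; infer_instance

-- ===== CLAIM (what is proved, stated in full; the proofs are below) =====
def Claim_equal_fungsi : Prop := ∀ (n : Int), Dom_fungsi n → Spec_fungsi n (fungsi n)

-- ===== LEMMAS AND PROOFS =====

-- the decimal digit characters of m, most significant first (what str(m) yields for m > 0)
def charsOf (m : Nat) : List Char :=
  if h : m < 10 then [Nat.digitChar m]
  else charsOf (m / 10) ++ [Nat.digitChar (m % 10)]
termination_by m
decreasing_by
  exact Nat.div_lt_self (by omega) (by norm_num)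

def dsum (m : Nat) : Int := ((charsOf m).map digitVal).sum
def dprod (m : Nat) : Int := ((charsOf m).map digitVal).prod

lemma digitVal_digitChar (d : Nat) (h : d < 10) : digitVal (Nat.digitChar d) = (d : Int) := by
  interval_cases d <;> decide

lemma charsOf_small {m : Nat} (h : m < 10) : charsOf m = [Nat.digitChar m] := by
  rw [charsOf]; simp [h]

lemma charsOf_large {m : Nat} (h : ¬ m < 10) :
    charsOf m = charsOf (m / 10) ++ [Nat.digitChar (m % 10)] := by
  rw [charsOf]; simp [h]

lemma dsum_small {m : Nat} (h : m < 10) : dsum m = (m : Int) := by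
  simp [dsum, charsOf_small h, digitVal_digitChar m h]

lemma dprod_small {m : Nat} (h : m < 10) : dprod m = (m : Int) := by
  simp [dprod, charsOf_small h, digitVal_digitChar m h]

lemma dsum_large {m : Nat} (h : ¬ m < 10) :
    dsum m = dsum (m / 10) + ((m % 10 : Nat) : Int) := by
  simp [dsum, charsOf_large h, digitVal_digitChar (m % 10) (Nat.mod_lt _ (by norm_num))]

lemma dprod_large {m : Nat} (h : ¬ m < 10) :
    dprod m = dprod (m / 10) * ((m % 10 : Nat) : Int) := by
  simp [dprod, charsOf_large h, digitVal_digitChar (m % 10) (Nat.mod_lt _ (by norm_num))]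

lemma toDigitsCore_eq_charsOf :
    ∀ (f m : Nat) (acc : List Char), 0 < m → m < 10 ^ f →
      Nat.toDigitsCore 10 f m acc = charsOf m ++ acc := by
  intro f
  induction f with
  | zero => intro m acc hm hlt; simp at hlt; omega
  | succ f ih =>
    intro m acc hm hlt
    simp only [Nat.toDigitsCore]
    by_cases h0 : m / 10 = 0
    · have hm10 : m < 10 := by omega
      rw [charsOf_small hm10, Nat.mod_eq_of_lt hm10]
      simp [h0]
    · have hge : ¬ m < 10 := by omega
      have hlt' : m / 10 < 10 ^ f := by
        rw [Nat.div_lt_iff_lt_mul (by norm_num)]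
        rw [pow_succ] at hlt; exact hlt
      rw [if_neg h0, ih (m / 10) _ (by omega) hlt', charsOf_large hge]
      simp

lemma toChars_pos (n : Int) (h : 0 < n) : PySem.Int.toChars n = charsOf n.toNat := by
  have hlt : n.toNat < 10 ^ (n.toNat + 1) :=
    lt_of_lt_of_le (Nat.lt_pow_self (by norm_num)) (Nat.pow_le_pow_right (by norm_num) (by omega))
  simp only [PySem.Int.toChars, if_neg (by omega : ¬ n < 0), Nat.toDigits]
  rw [toDigitsCore_eq_charsOf (n.toNat + 1) n.toNat [] (by omega) hlt]
  simp

lemma foldl_digit_pair (l : List Char) :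
    ∀ a b : Int,
      l.foldl (fun st c => (st.1 + digitVal c, st.2 * digitVal c)) (a, b)
        = (a + (l.map digitVal).sum, b * (l.map digitVal).prod) := by
  induction l with
  | nil => intro a b; simp
  | cons c l ih =>
    intro a b
    simp only [List.foldl_cons, List.map_cons, List.sum_cons, List.prod_cons, ih,
      Prod.mk.injEq]
    constructor <;> ring

lemma fungsiLoop_eq (m : Nat) :
    0 < m → ∀ j k : Int, fungsiLoop (m : Int) j k = (j + dsum m, k * dprod m) := by
  induction m using Nat.strong_induction_on with
  | _ m ih =>
    intro hm j k
    have hfd : PySem.Int.floordiv (m : Int) 10 = ((m / 10 : Nat) : Int) := by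
      exact_mod_cast PySem.Int.floordiv_natCast m 10
    have hmod : PySem.Int.mod (m : Int) 10 = ((m % 10 : Nat) : Int) := by
      exact_mod_cast PySem.Int.mod_natCast m 10
    rw [fungsiLoop, dif_pos (by exact_mod_cast hm), hfd, hmod]
    by_cases hs : m < 10
    · have h0 : m / 10 = 0 := by omega
      rw [h0, fungsiLoop, dif_neg (by norm_num), dsum_small hs, dprod_small hs,
        Nat.mod_eq_of_lt hs]
    · rw [ih (m / 10) (Nat.div_lt_self (by omega) (by norm_num)) (by omega),
        dsum_large hs, dprod_large hs]
      simp only [Prod.mk.injEq]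
      constructor <;> ring

-- ===== VERDICT (by name: the statement is the Claim_ definition above) =====
theorem fungsi_spec : Claim_equal_fungsi := by
  intro n _
  unfold Spec_fungsi fungsi fungsi_alt
  by_cases hn : n ≤ 0
  · rw [if_pos hn, fungsiLoop, dif_neg (by omega)]
  · have hpos : 0 < n := by omega
    have hcast : ((n.toNat : Nat) : Int) = n := Int.toNat_of_nonneg hpos.le
    have hloop : fungsiLoop n 0 1 = (0 + dsum n.toNat, 1 * dprod n.toNat) := by
      rw [← hcast]; exact fungsiLoop_eq n.toNat (by omega) 0 1
    rw [if_neg hn, hloop, toChars_pos n hpos, foldl_digit_pair]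
    simp [dsum, dprod]
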